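-- pv_equiv track=rewrite | github.com/allolib-s22/primary-evann | lab/chords.py | get_next_set
-- ===== SOURCE A (Python) =====
-- all_chords = ["I", "ii", "iii", "IV", "V", "vi", "viid", "I6", "ii6", "iii6", "IV6", "V6", "vi6", "viid6", "I64", "ii64", "iii64", "IV64", "V64", "vi64", "viid64"]
--
-- major = {
--       "I" : ["I", "ii", "iii", "IV", "V", "vi", "viid", "I6", "ii6", "iii6", "IV6", "V6", "vi6", "viid6", "I64", "ii64", "iii64", "IV64", "V64", "vi64", "viid64"],
--       "I6" : ["I", "ii", "iii", "IV", "V", "vi", "viid", "I6", "ii6", "iii6", "IV6", "V6", "vi6", "viid6", "I64", "ii64", "iii64", "IV64", "V64", "vi64", "viid64"],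
--       "I64" : ["I", "ii", "iii", "IV", "V", "vi", "viid", "I6", "ii6", "iii6", "IV6", "V6", "vi6", "viid6", "I64", "ii64", "iii64", "IV64", "V64", "vi64", "viid64"],
--       "ii" : ["I", "V", "viid", "I6", "V6", "viid6", "I64", "V64", "viid64"],
--       "ii6" : ["I", "V", "viid", "I6", "V6", "viid6", "I64", "V64", "viid64"],
--       "ii64" : ["I", "V", "viid", "I6", "V6", "viid6", "I64", "V64", "viid64"],
--       "iii" : ["I", "ii", "IV", "vi", "I6", "ii6", "IV6", "vi6", "I64", "ii64", "IV64", "vi64"],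
--       "iii6" : ["I", "ii", "IV", "vi", "I6", "ii6", "IV6", "vi6", "I64", "ii64", "IV64", "vi64"],
--       "iii64" : ["I", "ii", "IV", "vi", "I6", "ii6", "IV6", "vi6", "I64", "ii64", "IV64", "vi64"],
--       "IV" : ["I", "ii", "iii", "V", "viid", "I6", "ii6", "iii6", "V6", "viid6", "I64", "ii64", "iii64", "V64", "viid64"],
--       "IV6" : ["I", "ii", "iii", "V", "viid", "I6", "ii6", "iii6", "V6", "viid6", "I64", "ii64", "iii64", "V64", "viid64"],
--       "IV64" : ["I", "ii", "iii", "V", "viid", "I6", "ii6", "iii6", "V6", "viid6", "I64", "ii64", "iii64", "V64", "viid64"],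
--       "V" : ["I", "vi", "I6", "vi6", "I64", "vi64"],
--       "V6" : ["I", "vi", "I6", "vi6", "I64", "vi64"],
--       "V64" : ["I", "vi", "I6", "vi6", "I64", "vi64"],
--       "vi" : ["I", "ii", "iii", "IV", "V", "I6", "ii6", "iii6", "IV6", "V6", "I64", "ii64", "iii64", "IV64", "V64"],
--       "vi6" : ["I", "ii", "iii", "IV", "V", "I6", "ii6", "iii6", "IV6", "V6", "I64", "ii64", "iii64", "IV64", "V64"],
--       "vi64" : ["I", "ii", "iii", "IV", "V", "I6", "ii6", "iii6", "IV6", "V6", "I64", "ii64", "iii64", "IV64", "V64"],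
--       "viid" : ["I", "iii", "I6", "iii6", "I64", "iii64"],
--       "viid6" : ["I", "iii", "I6", "iii6", "I64", "iii64"],
--       "viid64" : ["I", "iii", "I6", "iii6", "I64", "iii64"]
-- }
--
-- chord_notes = {
--     "I" : ["C", "E", "G"],
--     "I6" : ["E", "G", "C"],
--     "I64": ["G", "C", "E"],
--     "ii": ["D", "F", "A"],
--     "ii6": ["F", "A", "D"],
--     "ii64": ["A", "D", "F"],
--     "iii": ["E", "G", "B"],
--     "iii6": ["G", "B", "E"],
--     "iii64": ["B", "E", "G"],
--     "IV": ["F", "A", "C"],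
--     "IV6": ["A", "C", "F"],
--     "IV64": ["C", "F", "A"],
--     "V": ["G", "B", "D"],
--     "V6": ["B", "D", "G"],
--     "V64": ["D", "G", "B"],
--     "vi": ["A", "C", "E"],
--     "vi6": ["C", "E", "A"],
--     "vi64": ["E", "A", "C"],
--     "viid": ["B", "D", "F"],
--     "viid6": ["D", "F", "B"],
--     "viid64": ["F", "B", "D"]
-- }
--
-- def chordToNotes(chord):
--     if chord in all_chords:
--         return chord_notes[chord]
--     else:
--         return []
--
-- def get_next_set(chord_previous):
--     if chord_previous in all_chords:
--         new_set = major[chord_previous]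
--
--         selection = {}
--         for i in new_set:
--             notes = chordToNotes(i)
--             if str(notes[1]) in selection.keys():
--                 selection[str(notes[1])].append(i)
--             else:
--                 selection[str(notes[1])] = [i]
--
--         return selection
-- ===== SOURCE B (Python) =====
-- all_chords = ["I", "ii", "iii", "IV", "V", "vi", "viid", "I6", "ii6", "iii6", "IV6", "V6", "vi6", "viid6", "I64", "ii64", "iii64", "IV64", "V64", "vi64", "viid64"]
--
-- # B derives everything from music theory instead of the two big per-chord tables:
-- # a chord name is root numeral + inversion suffix ("", "6", "64"); its notes are the
-- # root triad on the C-major scale rotated by the inversion, so the middle note of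
-- # root r with inversion inv is SCALE[(ROOTS.index(r) + 2*((inv+1)%3)) % 7], and
-- # major[c] is the allowed roots of c's root crossed with the three suffixes.
-- SCALE = ["C", "D", "E", "F", "G", "A", "B"]
-- ROOTS = ["I", "ii", "iii", "IV", "V", "vi", "viid"]
-- NEXT_ROOTS = {
--     "I": ["I", "ii", "iii", "IV", "V", "vi", "viid"],
--     "ii": ["I", "V", "viid"],
--     "iii": ["I", "ii", "IV", "vi"],
--     "IV": ["I", "ii", "iii", "V", "viid"],
--     "V": ["I", "vi"],
--     "vi": ["I", "ii", "iii", "IV", "V"],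
--     "viid": ["I", "iii"],
-- }
--
-- def get_next_set(chord_previous):
--     if chord_previous not in all_chords:
--         return None
--     root = chord_previous.rstrip("46")
--     pairs = [(r + suf, SCALE[(ROOTS.index(r) + 2 * ((inv + 1) % 3)) % 7])
--              for inv, suf in enumerate(("", "6", "64"))
--              for r in NEXT_ROOTS[root]]
--     keys = list(dict.fromkeys(m for _, m in pairs))
--     return {k: [c for c, m in pairs if m == k] for k in keys}
-- ===== Notes on version B (the rewrite author's own statement) =====
-- stated objective: alternative
-- what changed: B drops A's two big per-chord tables and incremental append-to-dict pass: it derives the successor chords and their middle notes from the chord name itself (root numeral via rstrip of the inversion suffix, triad rotated on the C-major scale) and then groups in two phases (ordered dedup of the middle notes, then a filter per key).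
import Mathlib
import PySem

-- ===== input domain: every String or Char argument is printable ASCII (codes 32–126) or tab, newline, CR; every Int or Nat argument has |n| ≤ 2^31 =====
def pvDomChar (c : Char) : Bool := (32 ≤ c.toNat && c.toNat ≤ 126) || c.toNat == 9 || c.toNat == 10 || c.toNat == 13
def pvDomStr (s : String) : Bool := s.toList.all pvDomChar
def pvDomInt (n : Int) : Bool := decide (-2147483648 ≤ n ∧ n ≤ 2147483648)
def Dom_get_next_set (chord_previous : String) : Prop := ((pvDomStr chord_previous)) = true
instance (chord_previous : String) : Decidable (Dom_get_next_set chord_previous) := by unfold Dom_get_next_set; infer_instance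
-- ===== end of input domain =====

-- B replaces A's per-chord lookup tables and incremental append-to-dict pass by deriving the
-- successor set and middle notes from the chord name (root numeral + inversion suffix, triad
-- rotated on the C-major scale) and a two-phase grouping (dedup keys, then filter); objective: alternative.

-- ===== PORT A =====
def pvAllChords : List String := ["I", "ii", "iii", "IV", "V", "vi", "viid", "I6", "ii6", "iii6", "IV6", "V6", "vi6", "viid6", "I64", "ii64", "iii64", "IV64", "V64", "vi64", "viid64"]

def pvMajor : PySem.Dict String (List String) := PySem.Dict.ofList [
  ("I", ["I", "ii", "iii", "IV", "V", "vi", "viid", "I6", "ii6", "iii6", "IV6", "V6", "vi6", "viid6", "I64", "ii64", "iii64", "IV64", "V64", "vi64", "viid64"]),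
  ("I6", ["I", "ii", "iii", "IV", "V", "vi", "viid", "I6", "ii6", "iii6", "IV6", "V6", "vi6", "viid6", "I64", "ii64", "iii64", "IV64", "V64", "vi64", "viid64"]),
  ("I64", ["I", "ii", "iii", "IV", "V", "vi", "viid", "I6", "ii6", "iii6", "IV6", "V6", "vi6", "viid6", "I64", "ii64", "iii64", "IV64", "V64", "vi64", "viid64"]),
  ("ii", ["I", "V", "viid", "I6", "V6", "viid6", "I64", "V64", "viid64"]),
  ("ii6", ["I", "V", "viid", "I6", "V6", "viid6", "I64", "V64", "viid64"]),
  ("ii64", ["I", "V", "viid", "I6", "V6", "viid6", "I64", "V64", "viid64"]),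
  ("iii", ["I", "ii", "IV", "vi", "I6", "ii6", "IV6", "vi6", "I64", "ii64", "IV64", "vi64"]),
  ("iii6", ["I", "ii", "IV", "vi", "I6", "ii6", "IV6", "vi6", "I64", "ii64", "IV64", "vi64"]),
  ("iii64", ["I", "ii", "IV", "vi", "I6", "ii6", "IV6", "vi6", "I64", "ii64", "IV64", "vi64"]),
  ("IV", ["I", "ii", "iii", "V", "viid", "I6", "ii6", "iii6", "V6", "viid6", "I64", "ii64", "iii64", "V64", "viid64"]),
  ("IV6", ["I", "ii", "iii", "V", "viid", "I6", "ii6", "iii6", "V6", "viid6", "I64", "ii64", "iii64", "V64", "viid64"]),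
  ("IV64", ["I", "ii", "iii", "V", "viid", "I6", "ii6", "iii6", "V6", "viid6", "I64", "ii64", "iii64", "V64", "viid64"]),
  ("V", ["I", "vi", "I6", "vi6", "I64", "vi64"]),
  ("V6", ["I", "vi", "I6", "vi6", "I64", "vi64"]),
  ("V64", ["I", "vi", "I6", "vi6", "I64", "vi64"]),
  ("vi", ["I", "ii", "iii", "IV", "V", "I6", "ii6", "iii6", "IV6", "V6", "I64", "ii64", "iii64", "IV64", "V64"]),
  ("vi6", ["I", "ii", "iii", "IV", "V", "I6", "ii6", "iii6", "IV6", "V6", "I64", "ii64", "iii64", "IV64", "V64"]),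
  ("vi64", ["I", "ii", "iii", "IV", "V", "I6", "ii6", "iii6", "IV6", "V6", "I64", "ii64", "iii64", "IV64", "V64"]),
  ("viid", ["I", "iii", "I6", "iii6", "I64", "iii64"]),
  ("viid6", ["I", "iii", "I6", "iii6", "I64", "iii64"]),
  ("viid64", ["I", "iii", "I6", "iii6", "I64", "iii64"])]

def pvChordNotes : PySem.Dict String (List String) := PySem.Dict.ofList [
  ("I", ["C", "E", "G"]), ("I6", ["E", "G", "C"]), ("I64", ["G", "C", "E"]),
  ("ii", ["D", "F", "A"]), ("ii6", ["F", "A", "D"]), ("ii64", ["A", "D", "F"]),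
  ("iii", ["E", "G", "B"]), ("iii6", ["G", "B", "E"]), ("iii64", ["B", "E", "G"]),
  ("IV", ["F", "A", "C"]), ("IV6", ["A", "C", "F"]), ("IV64", ["C", "F", "A"]),
  ("V", ["G", "B", "D"]), ("V6", ["B", "D", "G"]), ("V64", ["D", "G", "B"]),
  ("vi", ["A", "C", "E"]), ("vi6", ["C", "E", "A"]), ("vi64", ["E", "A", "C"]),
  ("viid", ["B", "D", "F"]), ("viid6", ["D", "F", "B"]), ("viid64", ["F", "B", "D"])]

-- chord_notes[chord] inside the guard always hits (dict lookup cannot KeyError here), so getD is exact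
def chordToNotes (chord : String) : List String :=
  if pvAllChords.contains chord then pvChordNotes.getD chord [] else []

-- notes[1]: every chord in new_set is in all_chords, so notes has 3 elements and the default is never used
def get_next_set (chord_previous : String) : Option (List (String × List String)) :=
  if pvAllChords.contains chord_previous then
    let new_set := pvMajor.getD chord_previous []
    let selection := new_set.foldl (fun (sel : PySem.Dict String (List String)) i =>
      let notes := chordToNotes i
      let key := PySem.List.pyGetD notes 1 ""
      if sel.contains key then sel.modify key [] (fun l => l ++ [i])
      else sel.insert key [i]) PySem.Dict.empty
    some selection.items
  else
    none

-- ===== PORT B =====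
def pvScale : List String := ["C", "D", "E", "F", "G", "A", "B"]
def pvRoots : List String := ["I", "ii", "iii", "IV", "V", "vi", "viid"]
def pvNextRoots : PySem.Dict String (List String) := PySem.Dict.ofList [
  ("I", ["I", "ii", "iii", "IV", "V", "vi", "viid"]),
  ("ii", ["I", "V", "viid"]),
  ("iii", ["I", "ii", "IV", "vi"]),
  ("IV", ["I", "ii", "iii", "V", "viid"]),
  ("V", ["I", "vi"]),
  ("vi", ["I", "ii", "iii", "IV", "V"]),
  ("viid", ["I", "iii"])]

-- hand port of Python's s.rstrip("46") (strip '4'/'6' characters from the right only): exact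
def pvRstrip46 (s : String) : String :=
  String.ofList ((s.toList.reverse.dropWhile (fun c => c == '4' || c == '6')).reverse)

-- ROOTS.index(r): r is always a member here, so the getD default is never used;
-- NEXT_ROOTS[root] likewise always hits inside the guard, so getD is exact
def get_next_set_alt (chord_previous : String) : Option (List (String × List String)) :=
  if !(pvAllChords.contains chord_previous) then
    none
  else
    let root := pvRstrip46 chord_previous
    let pairs := (PySem.List.enumerate ["", "6", "64"]).flatMap (fun p =>
      (pvNextRoots.getD root []).map (fun r =>
        (r ++ p.2,
         PySem.List.pyGetD pvScale
           (PySem.Int.mod (((PySem.List.index? pvRoots r).getD 0 : Int) + 2 * PySem.Int.mod (p.1 + 1) 3) 7) "")))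
    let keys := PySem.List.dedup (pairs.map (fun cm => cm.2))
    some (keys.map (fun k => (k, (pairs.filter (fun cm => cm.2 == k)).map (fun cm => cm.1))))

-- ===== PRECONDITION & SPEC =====
def Spec_get_next_set (chord_previous : String) (out : Option (List (String × List String))) : Prop := out = get_next_set_alt chord_previous
instance (chord_previous : String) (out : Option (List (String × List String))) : Decidable (Spec_get_next_set chord_previous out) := by unfold Spec_get_next_set; infer_instance

-- ===== CLAIM =====
def Claim_equal_get_next_set : Prop := ∀ (chord_previous : String), Dom_get_next_set chord_previous → Spec_get_next_set chord_previous (get_next_set chord_previous)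

-- ===== LEMMAS AND PROOFS =====

-- ===== VERDICT =====
set_option maxRecDepth 8000 in
theorem get_next_set_spec : Claim_equal_get_next_set := by
  intro s _
  unfold Spec_get_next_set
  by_cases h : pvAllChords.contains s = true
  · have hm : s ∈ pvAllChords := by simpa using h
    simp only [pvAllChords, List.mem_cons, List.not_mem_nil, or_false] at hm
    rcases hm with rfl|rfl|rfl|rfl|rfl|rfl|rfl|rfl|rfl|rfl|rfl|rfl|rfl|rfl|rfl|rfl|rfl|rfl|rfl|rfl|rfl <;> decide
  · have h' : s ∉ pvAllChords := by simpa using h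
    simp [get_next_set, get_next_set_alt, h']
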